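-- pv_equiv track=rewrite | github.com/ChaeByunghoon/KerasModel | FileController.py | _get_non_bug_copied_list
-- ===== SOURCE A (Python) =====
-- def _get_non_bug_copied_list(non_bug_set, set_num, non_bug_answer_set):
--     new_bug_set = list()
--     new_bug_answer_set = list()
--     iter_num = int(set_num / len(non_bug_set))
--     for i in range(0, iter_num):
--         new_bug_set += non_bug_set
--         new_bug_answer_set += non_bug_answer_set
--     remain_num = set_num - len(new_bug_set)
--     for i in range(0, remain_num):
--         new_bug_set.append(non_bug_set[i])
--         new_bug_answer_set.append(1)
--
--     return new_bug_set, new_bug_answer_set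
-- ===== SOURCE B (Python) =====
-- def _get_non_bug_copied_list(non_bug_set, set_num, non_bug_answer_set):
--     q, r = divmod(max(set_num, 0), len(non_bug_set))
--     return non_bug_set * q + non_bug_set[:r], non_bug_answer_set * q + [1] * r
-- ===== Notes on version B (the rewrite author's own statement) =====
-- stated objective: simpler
-- what changed: Replaces the two accumulation loops (bulk-copy loop plus element-append remainder loop) with a loop-free closed form: divmod once, then list repetition, a slice and [1]*r.
import Mathlib
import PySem

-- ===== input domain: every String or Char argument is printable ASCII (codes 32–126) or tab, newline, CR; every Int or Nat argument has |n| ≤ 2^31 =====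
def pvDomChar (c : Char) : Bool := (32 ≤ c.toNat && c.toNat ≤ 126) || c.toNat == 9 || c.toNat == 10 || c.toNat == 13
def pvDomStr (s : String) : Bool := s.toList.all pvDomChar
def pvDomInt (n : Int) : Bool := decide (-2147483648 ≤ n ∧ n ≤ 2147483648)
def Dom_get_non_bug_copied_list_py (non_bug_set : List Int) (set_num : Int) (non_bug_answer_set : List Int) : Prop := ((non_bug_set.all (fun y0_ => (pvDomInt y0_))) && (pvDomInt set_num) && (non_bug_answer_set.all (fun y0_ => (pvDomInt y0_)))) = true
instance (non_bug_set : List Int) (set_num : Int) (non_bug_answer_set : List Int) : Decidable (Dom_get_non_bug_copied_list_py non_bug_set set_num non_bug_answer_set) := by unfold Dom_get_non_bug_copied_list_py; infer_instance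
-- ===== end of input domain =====

-- B replaces A's two accumulation loops by a loop-free closed form (divmod, list repetition, slice); equivalence on non-empty non_bug_set.

-- ===== PORT A =====
-- int(set_num / len(...)) is float true division truncated toward zero; on Dom (|set_num| ≤ 2^31 < 2^53,
-- 1 ≤ len) the float quotient never rounds across an integer, so it is exactly Int.tdiv.
def get_non_bug_copied_list_py (non_bug_set : List Int) (set_num : Int) (non_bug_answer_set : List Int) : List Int × List Int :=
  let iter_num := Int.tdiv set_num non_bug_set.length
  let p := (PySem.List.pyRange 0 iter_num 1).foldl
      (fun (p : List Int × List Int) _ => (p.1 ++ non_bug_set, p.2 ++ non_bug_answer_set)) ([], [])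
  let remain_num := set_num - (p.1.length : Int)
  -- under Pre_ (non_bug_set ≠ []) every index i of the remainder loop is in range, so pyGetD never uses its default
  (PySem.List.pyRange 0 remain_num 1).foldl
      (fun (p : List Int × List Int) i => (p.1 ++ [PySem.List.pyGetD non_bug_set i 0], p.2 ++ [1])) p

-- ===== PORT B =====
def get_non_bug_copied_list_py_alt (non_bug_set : List Int) (set_num : Int) (non_bug_answer_set : List Int) : List Int × List Int :=
  let m := max set_num 0
  let q := PySem.Int.floordiv m non_bug_set.length
  let r := PySem.Int.mod m non_bug_set.length
  ((List.replicate q.toNat non_bug_set).flatten ++ PySem.List.slice non_bug_set none (some r),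
   (List.replicate q.toNat non_bug_answer_set).flatten ++ List.replicate r.toNat 1)

-- ===== PRECONDITION & SPEC =====
-- Pre_ excludes only non_bug_set = [], on which A raises ZeroDivisionError (and B raises too).
def Pre_get_non_bug_copied_list_py (non_bug_set : List Int) (set_num : Int) (non_bug_answer_set : List Int) : Prop := non_bug_set ≠ []
instance (non_bug_set : List Int) (set_num : Int) (non_bug_answer_set : List Int) : Decidable (Pre_get_non_bug_copied_list_py non_bug_set set_num non_bug_answer_set) := by unfold Pre_get_non_bug_copied_list_py; infer_instance
def pvWitness_get_non_bug_copied_list_py : List Int × Int × List Int := ([3, 4], 5, [0, 1])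

def Spec_get_non_bug_copied_list_py (non_bug_set : List Int) (set_num : Int) (non_bug_answer_set : List Int) (out : List Int × List Int) : Prop := out = get_non_bug_copied_list_py_alt non_bug_set set_num non_bug_answer_set
instance (non_bug_set : List Int) (set_num : Int) (non_bug_answer_set : List Int) (out : List Int × List Int) : Decidable (Spec_get_non_bug_copied_list_py non_bug_set set_num non_bug_answer_set out) := by unfold Spec_get_non_bug_copied_list_py; infer_instance

-- ===== CLAIM (what is proved, stated in full; the proofs are below) =====
def Claim_equal_get_non_bug_copied_list_py : Prop := ∀ (non_bug_set : List Int) (set_num : Int) (non_bug_answer_set : List Int), Dom_get_non_bug_copied_list_py non_bug_set set_num non_bug_answer_set → Pre_get_non_bug_copied_list_py non_bug_set set_num non_bug_answer_set → Spec_get_non_bug_copied_list_py non_bug_set set_num non_bug_answer_set (get_non_bug_copied_list_py non_bug_set set_num non_bug_answer_set)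

-- ===== LEMMAS AND PROOFS =====

-- bulk loop: folding k times appending nb/ans equals flatten of k replicas
theorem pv_bulk_loop (nb ans : List Int) (k : Nat) (a1 a2 : List Int) :
    (PySem.List.pyRange 0 (k : Int)).foldl
      (fun (p : List Int × List Int) _ => (p.1 ++ nb, p.2 ++ ans)) (a1, a2)
    = (a1 ++ (List.replicate k nb).flatten, a2 ++ (List.replicate k ans).flatten) := by
  induction k generalizing a1 a2 with
  | zero => simp [PySem.List.pyRange_one_eq_nil (le_refl 0)]
  | succ k ih =>
      rw [show ((k+1 : Nat) : Int) = (k : Int) + 1 by push_cast; ring,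
        PySem.List.pyRange_one_succ_right (show (0:Int) ≤ k by positivity), List.foldl_append]
      simp [ih, List.replicate_succ' (n := k)]

-- remainder loop: folding over range(0, r) appending nb[i] and 1
theorem pv_rem_loop (nb : List Int) (r : Nat) (hr : r ≤ nb.length) (a1 a2 : List Int) :
    (PySem.List.pyRange 0 (r : Int)).foldl
      (fun (p : List Int × List Int) i => (p.1 ++ [PySem.List.pyGetD nb i 0], p.2 ++ [1])) (a1, a2)
    = (a1 ++ nb.take r, a2 ++ List.replicate r 1) := by
  induction r generalizing a1 a2 with
  | zero => simp [PySem.List.pyRange_one_eq_nil (le_refl 0)]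
  | succ r ih =>
      have hrlt : r < nb.length := by omega
      rw [show ((r+1 : Nat) : Int) = (r : Int) + 1 by push_cast; ring,
        PySem.List.pyRange_one_succ_right (show (0:Int) ≤ r by positivity), List.foldl_append]
      rw [ih (by omega)]
      have hget : PySem.List.pyGetD nb ((r : Nat) : Int) 0 = nb[r] := by
        rw [PySem.List.pyGetD_of_nonneg nb 0 (by positivity)]
        simp [List.getD_eq_getElem?_getD, List.getElem?_eq_getElem hrlt]
      simp only [List.foldl_cons, List.foldl_nil, hget]
      rw [List.take_add_one, List.getElem?_eq_getElem hrlt]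
      simp [List.replicate_succ' (n := r), List.append_assoc]

-- ===== VERDICT (by name: the statement is the Claim_ definition above) =====
theorem get_non_bug_copied_list_py_spec : Claim_equal_get_non_bug_copied_list_py := by
  intro nb s ans _ hpre
  unfold Spec_get_non_bug_copied_list_py get_non_bug_copied_list_py get_non_bug_copied_list_py_alt
  dsimp only
  have hn : 0 < (nb.length : Int) := by
    have h1 : 0 < nb.length := List.length_pos_of_ne_nil hpre
    exact_mod_cast h1
  by_cases hs : 0 ≤ s
  · -- set_num ≥ 0: int(s/n) is the floor quotient; A builds q copies then r = s mod n extra elements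
    have htd : Int.tdiv s (nb.length : Int) = PySem.Int.floordiv s (nb.length : Int) := by
      rw [PySem.Int.floordiv_eq_ediv_of_pos hn, Int.tdiv_eq_ediv]
      simp [hs]
    have hmax : max s 0 = s := by omega
    set q := PySem.Int.floordiv s (nb.length : Int) with hq
    set r := PySem.Int.mod s (nb.length : Int) with hr
    have hr0 : 0 ≤ r := PySem.Int.mod_nonneg s hn
    have hrlt : r < nb.length := PySem.Int.mod_lt s hn
    have hqr : q * nb.length + r = s := PySem.Int.floordiv_mul_add_mod s (nb.length : Int)
    have hq0 : 0 ≤ q := by nlinarith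
    have hqcast : ((q.toNat : Nat) : Int) = q := Int.toNat_of_nonneg hq0
    rw [htd, hmax, show q = ((q.toNat : Nat) : Int) from hqcast.symm, pv_bulk_loop]
    simp only [List.nil_append, List.length_flatten, List.map_replicate, List.sum_replicate,
      smul_eq_mul]
    have hrem : s - ((q.toNat * nb.length : Nat) : Int) = ((r.toNat : Nat) : Int) := by
      push_cast [hqcast]
      omega
    rw [hrem, pv_rem_loop nb r.toNat (by omega), PySem.List.slice_to nb hr0]
  · -- set_num < 0: both loops are empty and B's max clamps to 0: both return ([], [])
    have htd : Int.tdiv s (nb.length : Int) ≤ 0 := by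
      have h1 : Int.tdiv s (nb.length : Int) = - Int.tdiv (-s) (nb.length : Int) := by
        rw [← Int.neg_tdiv, neg_neg]
      have h2 : 0 ≤ Int.tdiv (-s) (nb.length : Int) := Int.tdiv_nonneg (by omega) (by omega)
      omega
    have hmax : max s 0 = 0 := by omega
    rw [hmax, PySem.List.pyRange_one_eq_nil htd]
    simp only [List.foldl_nil, List.length_nil, Nat.cast_zero, sub_zero]
    rw [PySem.List.pyRange_one_eq_nil (by omega : s ≤ (0:Int))]
    have hq : PySem.Int.floordiv 0 (nb.length : Int) = 0 := by
      rw [PySem.Int.floordiv_eq_ediv_of_pos hn]; simp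
    have hr : PySem.Int.mod 0 (nb.length : Int) = 0 := by
      have h3 := PySem.Int.floordiv_mul_add_mod 0 (nb.length : Int)
      rw [hq] at h3; omega
    simp [hq, hr, PySem.List.slice_to nb (le_refl 0)]
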